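-- pv_equiv track=rewrite | github.com/AndreasDahl/Titusinde | roll.py | pop_digit
-- ===== SOURCE A (Python) =====
-- def pop_digit(n, combo_score, single_score = 0):
--     score = 0
--     # Check combo
--     if n >= 3:
--         score = combo_score
--         n -= 3
--         while n > 0:
--             score *= 2
--             n -= 1
--     # if no combo, add single
--     score += n * single_score
--     return score
-- ===== SOURCE B (Python) =====
-- def pop_digit(n, combo_score, single_score=0):
--     if n >= 3:
--         return combo_score * 2 ** (n - 3)
--     return n * single_score
-- ===== Notes on version B (the rewrite author's own statement) =====
-- stated objective: simpler
-- what changed: Replaced the doubling while loop with the closed form combo_score * 2**(n-3) for n >= 3, and n*single_score otherwise (after the loop n is 0, so the single term vanishes in the combo branch).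
import Mathlib
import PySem

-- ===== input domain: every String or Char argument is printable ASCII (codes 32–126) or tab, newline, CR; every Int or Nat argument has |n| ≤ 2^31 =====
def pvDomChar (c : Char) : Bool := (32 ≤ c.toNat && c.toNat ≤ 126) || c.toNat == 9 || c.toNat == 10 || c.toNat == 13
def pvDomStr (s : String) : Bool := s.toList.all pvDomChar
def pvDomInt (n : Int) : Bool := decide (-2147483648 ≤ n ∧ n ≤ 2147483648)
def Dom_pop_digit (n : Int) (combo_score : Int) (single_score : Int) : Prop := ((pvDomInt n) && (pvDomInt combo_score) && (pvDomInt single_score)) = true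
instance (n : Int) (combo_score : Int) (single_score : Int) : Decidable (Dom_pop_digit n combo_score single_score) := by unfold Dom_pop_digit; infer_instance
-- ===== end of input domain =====

-- B replaces A's doubling while-loop with the closed form combo_score * 2^(n-3) (simpler).


-- ===== PORT A =====
-- the 'while n > 0: score *= 2; n -= 1' loop, returning (final score, final n)
def popLoop (n : Int) (score : Int) : Int × Int :=
  if h : n > 0 then popLoop (n - 1) (score * 2) else (score, n)
  termination_by n.toNat
  decreasing_by omega

def pop_digit (n : Int) (combo_score : Int) (single_score : Int) : Int :=
  let score : Int := 0
  if n ≥ 3 then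
    let score := combo_score
    let n := n - 3
    let (score, n) := popLoop n score
    score + n * single_score
  else
    score + n * single_score

-- ===== PORT B =====
def pop_digit_alt (n : Int) (combo_score : Int) (single_score : Int) : Int :=
  if n ≥ 3 then combo_score * 2 ^ (n - 3).toNat
  else n * single_score

-- ===== PRECONDITION & SPEC =====
def Spec_pop_digit (n : Int) (combo_score : Int) (single_score : Int) (out : Int) : Prop := out = pop_digit_alt n combo_score single_score
instance (n : Int) (combo_score : Int) (single_score : Int) (out : Int) : Decidable (Spec_pop_digit n combo_score single_score out) := by unfold Spec_pop_digit; infer_instance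

-- ===== CLAIM (what is proved, stated in full; the proofs are below) =====
def Claim_equal_pop_digit : Prop := ∀ (n : Int) (combo_score : Int) (single_score : Int), Dom_pop_digit n combo_score single_score → Spec_pop_digit n combo_score single_score (pop_digit n combo_score single_score)

-- ===== LEMMAS AND PROOFS =====
theorem popLoop_eq (k : Nat) : ∀ (n : Int), n.toNat = k → 0 ≤ n → ∀ score : Int,
    popLoop n score = (score * 2 ^ k, 0) := by
  induction k with
  | zero =>
      intro n hk hn score
      have hn0 : n = 0 := by omega
      simp [popLoop, hn0]
  | succ m ih =>
      intro n hk hn score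
      rw [popLoop]
      have h1 : n > 0 := by omega
      simp only [h1, dif_pos]
      rw [ih (n - 1) (by omega) (by omega)]
      rw [pow_succ]
      ring_nf

-- ===== VERDICT (by name: the statement is the Claim_ definition above) =====
theorem pop_digit_spec : Claim_equal_pop_digit := by
  intro n c s _
  unfold Spec_pop_digit pop_digit pop_digit_alt
  by_cases h : n ≥ 3
  · have h0 : (0:Int) ≤ n - 3 := by omega
    simp only [h, if_pos, popLoop_eq (n-3).toNat (n-3) rfl h0]
    ring
  · simp [h]
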